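-- pv_equiv track=rewrite | github.com/HaeYeon-Won/I-Studied | CodingStudy/dp/[2565]전깃줄.py | solution
-- ===== SOURCE A (Python) =====
-- def binary_search(n, arr, target):
--     start, end = 0, n-1
--     while start<end:
--         mid = (start+end)//2
--         if arr[mid]<target:
--             start=mid+1
--         else:
--             end=mid #mid 포함 왼쪽 (target과 같은게 없을 때 큰수중 가장 작은값을 위해)
--     return end
--
-- def solution(n, data):
--     result=[]
--     result.append(data[0][1])
--     for i in range(1,n):
--         if result[-1]<data[i][1]:
--             result.append(data[i][1])
--         else:
--             idx = binary_search(len(result), result, data[i][1])  # 이분탐색하여 해당 숫자가 어디에 들어갈지 결정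
--             result[idx] = data[i][1]
--
--     return n-len(result)
-- ===== SOURCE B (Python) =====
-- def solution(n, data):
--     # O(n^2) DP: dp[i] = length of the longest strictly increasing subsequence of
--     # data[0..i][1] ending at wire i (the first wire always gives length 1);
--     # answer = n - max(dp).
--     dp = [1]
--     for i in range(1, n):
--         x = data[i][1]
--         best = 0
--         for j in range(i):
--             if data[j][1] < x and best < dp[j]:
--                 best = dp[j]
--         dp.append(best + 1)
--     return n - max(dp)
-- ===== Notes on version B (the rewrite author's own statement) =====
-- stated objective: alternative
-- what changed: Replaces patience sorting (maintaining a sorted pile-tails list updated via hand-written binary search) with the classic O(n^2) dynamic program over longest-strictly-increasing-subsequence lengths ending at each wire, returning n - max(dp).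
import Mathlib
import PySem

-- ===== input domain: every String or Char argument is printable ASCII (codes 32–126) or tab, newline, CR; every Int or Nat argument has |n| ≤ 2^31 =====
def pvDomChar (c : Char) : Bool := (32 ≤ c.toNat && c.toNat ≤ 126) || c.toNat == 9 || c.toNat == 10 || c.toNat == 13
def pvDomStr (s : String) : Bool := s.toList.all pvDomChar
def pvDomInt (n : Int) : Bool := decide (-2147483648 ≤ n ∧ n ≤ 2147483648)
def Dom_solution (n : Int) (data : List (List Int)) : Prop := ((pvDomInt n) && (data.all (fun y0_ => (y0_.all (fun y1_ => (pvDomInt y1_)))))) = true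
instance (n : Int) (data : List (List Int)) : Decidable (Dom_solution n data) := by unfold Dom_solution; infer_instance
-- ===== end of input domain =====

-- B replaces A's patience-sorting LIS computation (binary search into a pile-tails list)
-- by the classic O(n^2) dynamic program over LIS lengths ending at each index (alternative
-- algorithm, not claimed faster).


-- ===== PORT A =====
-- the while-loop of binary_search as fuel recursion (the fuel only makes it total;
-- with the fuel passed below it is never exhausted before the loop exits)
def bsearchAux (arr : List Int) (target : Int) : Nat → Int → Int → Int
  | 0, _, e => e
  | f+1, s, e =>
    if s < e then
      let mid := PySem.Int.floordiv (s + e) 2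
      if PySem.List.pyGetD arr mid 0 < target then bsearchAux arr target f (mid + 1) e
      else bsearchAux arr target f s mid
    else e

def binary_search (n : Int) (arr : List Int) (target : Int) : Int :=
  bsearchAux arr target (n.toNat + 1) 0 (n - 1)

def solution (n : Int) (data : List (List Int)) : Int :=
  let result : List Int := [PySem.List.pyGetD (PySem.List.pyGetD data 0 []) 1 0]
  let result := (PySem.List.pyRange 1 n 1).foldl (fun result i =>
    let x := PySem.List.pyGetD (PySem.List.pyGetD data i []) 1 0
    if PySem.List.pyGetD result (-1) 0 < x then result ++ [x]
    else
      let idx := binary_search (result.length : Int) result x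
      PySem.List.pySetD result idx x) result
  n - (result.length : Int)

-- ===== PORT B =====
def solution_alt (n : Int) (data : List (List Int)) : Int :=
  let dp : List Int := (PySem.List.pyRange 1 n 1).foldl (fun dp i =>
    let x := PySem.List.pyGetD (PySem.List.pyGetD data i []) 1 0
    let best := (PySem.List.pyRange 0 i 1).foldl (fun best j =>
      if PySem.List.pyGetD (PySem.List.pyGetD data j []) 1 0 < x ∧
         best < PySem.List.pyGetD dp j 0 then PySem.List.pyGetD dp j 0 else best) 0
    dp ++ [best + 1]) [1]
  n - (PySem.List.max? dp (fun y => y)).getD 0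

-- ===== PRECONDITION & SPEC =====
-- Pre_ admits exactly the inputs where the Python A returns: the first row must have both
-- endpoints (A always reads data[0][1]), there are at least n rows, and every row read by
-- the loop has both endpoints; every excluded input makes A raise IndexError.
def Pre_solution (n : Int) (data : List (List Int)) : Prop :=
  2 ≤ (data.getD 0 []).length ∧ n ≤ (data.length : Int) ∧ ∀ l ∈ data.take n.toNat, 2 ≤ l.length
instance (n : Int) (data : List (List Int)) : Decidable (Pre_solution n data) := by
  unfold Pre_solution; infer_instance

def pvWitness_solution : Int × List (List Int) := (2, [[0, 1], [0, 2]])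

def Spec_solution (n : Int) (data : List (List Int)) (out : Int) : Prop := out = solution_alt n data
instance (n : Int) (data : List (List Int)) (out : Int) : Decidable (Spec_solution n data out) := by unfold Spec_solution; infer_instance

-- ===== CLAIM (what is proved, stated in full; the proofs are below) =====
def Claim_equal_solution : Prop := ∀ (n : Int) (data : List (List Int)), Dom_solution n data → Pre_solution n data → Spec_solution n data (solution n data)

-- ===== LEMMAS AND PROOFS =====

-- the value of wire i (second column), as both ports read it
def valAt (data : List (List Int)) (i : Int) : Int :=
  PySem.List.pyGetD (PySem.List.pyGetD data i []) 1 0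

-- A's loop body as a function of the wire value
def patStep (r : List Int) (x : Int) : List Int :=
  if PySem.List.pyGetD r (-1) 0 < x then r ++ [x]
  else PySem.List.pySetD r (binary_search (r.length : Int) r x) x

-- B's inner maximum, over (value, dp) pairs
def bestOf (acc : List (Int × Int)) (x : Int) : Int :=
  acc.foldl (fun b p => if p.1 < x ∧ b < p.2 then p.2 else b) 0

def dpStep (acc : List (Int × Int)) (x : Int) : List (Int × Int) :=
  acc ++ [(x, bestOf acc x + 1)]

def maxd (acc : List (Int × Int)) : Int := acc.foldl (fun b p => max b p.2) 0

-- the coupling invariant: r is A's pile-tails list, acc pairs each processed value with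
-- its DP value; r is strictly sorted, its length is the max DP value, r[j] is realised by
-- some element of DP value j+1, and every element's tail bound holds
structure PatInv (acc : List (Int × Int)) (r : List Int) : Prop where
  ne : acc ≠ []
  sorted : r.Pairwise (· < ·)
  pos : ∀ p ∈ acc, 1 ≤ p.2
  len : (r.length : Int) = maxd acc
  wit : ∀ j, (hj : j < r.length) → ∃ p ∈ acc, p.2 = (j : Int) + 1 ∧ p.1 = r[j]
  tail : ∀ p ∈ acc, ∃ j : Nat, (j : Int) = p.2 - 1 ∧ ∃ hj : j < r.length, r[j] ≤ p.1

lemma sorted_lt_iff (x : Int) : ∀ (r : List Int), r.Pairwise (· < ·) →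
    ∀ (j : Nat) (hj : j < r.length),
    (r[j] < x ↔ j < r.countP (fun y => decide (y < x))) := by
  intro r
  induction r with
  | nil => intro _ j hj; simp at hj
  | cons a t ih =>
    intro hp j hj
    have ha : ∀ y ∈ t, a < y := by
      intro y hy; exact (List.pairwise_cons.mp hp).1 y hy
    have ht : t.Pairwise (· < ·) := (List.pairwise_cons.mp hp).2
    by_cases hax : a < x
    · have hc : (a :: t).countP (fun y => decide (y < x)) = t.countP (fun y => decide (y < x)) + 1 := by
        simp [hax]
      cases j with
      | zero => simpa [hc] using hax
      | succ j =>
        have hj' : j < t.length := by simpa using hj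
        have h2 := ih ht j hj'
        simp only [List.getElem_cons_succ, hc]
        simpa [Nat.succ_lt_succ_iff] using h2
    · have ht0 : t.countP (fun y => decide (y < x)) = 0 := by
        apply List.countP_eq_zero.mpr
        intro y hy
        simp only [decide_eq_true_eq]
        exact fun hyx => hax (lt_trans (ha y hy) hyx)
      have hc : (a :: t).countP (fun y => decide (y < x)) = 0 := by
        simp [hax, ht0]
      cases j with
      | zero => simp [hc, hax]
      | succ j =>
        have hj' : j < t.length := by simpa using hj
        simp only [List.getElem_cons_succ, hc]
        constructor
        · intro hlt
          exact absurd hlt (by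
            have := ha (t[j]) (List.getElem_mem hj')
            intro h'; exact hax (lt_trans this h'))
        · omega

lemma bsearchAux_spec (r : List Int) (x : Int) (hr : r.Pairwise (· < ·)) :
    ∀ (fuel : Nat) (s e : Int), 0 ≤ s → s ≤ e → e < (r.length : Int) →
    (e - s).toNat < fuel →
    s ≤ (r.countP (fun y => decide (y < x)) : Int) →
    (r.countP (fun y => decide (y < x)) : Int) ≤ e →
    bsearchAux r x fuel s e = (r.countP (fun y => decide (y < x)) : Int) := by
  intro fuel
  induction fuel with
  | zero => intro s e h0 hse he hf hk1 hk2; omega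
  | succ f ih =>
    intro s e h0 hse he hf hk1 hk2
    by_cases hlt : s < e
    · have hmid1 : s ≤ PySem.Int.floordiv (s + e) 2 :=
        (PySem.Int.floordiv_two_mid_bounds (le_of_lt hlt)).1
      have hmid2 : PySem.Int.floordiv (s + e) 2 < e := by
        rw [PySem.Int.floordiv_lt_iff_lt_mul (by omega)]
        omega
      set mid := PySem.Int.floordiv (s + e) 2 with hmiddef
      have hmid0 : 0 ≤ mid := le_trans h0 hmid1
      have hmidlen : mid < (r.length : Int) := lt_trans hmid2 he
      have hget : PySem.List.pyGetD r mid 0 = r[mid.toNat]'(by omega) :=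
        PySem.List.pyGetD_eq_getElem r 0 hmid0 hmidlen
      have hiff := sorted_lt_iff x r hr mid.toNat (by omega)
      simp only [bsearchAux, if_pos hlt, ← hmiddef, hget]
      by_cases hcmp : r[mid.toNat]'(by omega) < x
      · rw [if_pos hcmp]
        have : mid.toNat < r.countP (fun y => decide (y < x)) := hiff.mp hcmp
        exact ih (mid + 1) e (by omega) (by omega) he (by omega) (by omega) hk2
      · rw [if_neg hcmp]
        have : ¬ mid.toNat < r.countP (fun y => decide (y < x)) := fun h => hcmp (hiff.mpr h)
        exact ih s mid h0 hmid1 hmidlen (by omega) hk1 (by omega)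
    · simp only [bsearchAux, if_neg hlt]
      omega

lemma bsearch_spec (r : List Int) (x : Int) (hr : r.Pairwise (· < ·)) (hne : r ≠ [])
    (hlast : ¬ r.getLast hne < x) :
    binary_search (r.length : Int) r x = (r.countP (fun y => decide (y < x)) : Int) := by
  have hlen : 0 < r.length := List.length_pos_iff.mpr hne
  have hlast' : r.getLast hne = r[r.length - 1]'(by omega) := List.getLast_eq_getElem hne
  have hiff := sorted_lt_iff x r hr (r.length - 1) (by omega)
  have hk : r.countP (fun y => decide (y < x)) ≤ r.length - 1 := by
    by_contra h
    exact hlast (hlast' ▸ hiff.mpr (by omega))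
  unfold binary_search
  exact bsearchAux_spec r x hr _ 0 ((r.length : Int) - 1) (by omega) (by omega) (by omega)
    (by omega) (by omega) (by omega)

lemma bestOf_bounds (x : Int) : ∀ (acc : List (Int × Int)) (b : Int),
    (b ≤ acc.foldl (fun b p => if p.1 < x ∧ b < p.2 then p.2 else b) b) ∧
    (acc.foldl (fun b p => if p.1 < x ∧ b < p.2 then p.2 else b) b = b ∨
      ∃ p ∈ acc, p.1 < x ∧ p.2 = acc.foldl (fun b p => if p.1 < x ∧ b < p.2 then p.2 else b) b) ∧
    (∀ p ∈ acc, p.1 < x → p.2 ≤ acc.foldl (fun b p => if p.1 < x ∧ b < p.2 then p.2 else b) b) := by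
  intro acc
  induction acc with
  | nil => intro b; simp
  | cons q t ih =>
    intro b
    simp only [List.foldl_cons]
    by_cases hq : q.1 < x ∧ b < q.2
    · rw [if_pos hq]
      obtain ⟨h1, h2, h3⟩ := ih q.2
      refine ⟨le_trans (le_of_lt hq.2) h1, ?_, ?_⟩
      · rcases h2 with h | ⟨p, hp, hpx, hpe⟩
        · exact Or.inr ⟨q, by simp, hq.1, h.symm ▸ rfl⟩
        · exact Or.inr ⟨p, by simp [hp], hpx, hpe⟩
      · intro p hp hpx
        rcases List.mem_cons.mp hp with h | h
        · exact h ▸ h1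
        · exact h3 p h hpx
    · rw [if_neg hq]
      obtain ⟨h1, h2, h3⟩ := ih b
      refine ⟨h1, ?_, ?_⟩
      · rcases h2 with h | ⟨p, hp, hpx, hpe⟩
        · exact Or.inl h
        · exact Or.inr ⟨p, by simp [hp], hpx, hpe⟩
      · intro p hp hpx
        rcases List.mem_cons.mp hp with h | h
        · subst h
          by_cases hb : b < p.2
          · exact absurd ⟨hpx, hb⟩ hq
          · exact le_trans (by omega) h1
        · exact h3 p h hpx

lemma maxd_append (acc : List (Int × Int)) (p : Int × Int) :
    maxd (acc ++ [p]) = max (maxd acc) p.2 := by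
  simp [maxd, List.foldl_append]

lemma patinv_len_pos (acc : List (Int × Int)) (r : List Int) (h : PatInv acc r) :
    0 < r.length := by
  obtain ⟨p, hp⟩ := List.exists_mem_of_ne_nil acc h.ne
  have h1 := h.pos p hp
  have h2 := (PySem.List.le_foldl_max_int acc (fun p => p.2) 0).2 p hp
  have h3 := h.len
  unfold maxd at h3
  omega

-- bestOf equals the lower-bound count k
lemma bestOf_eq_countP (acc : List (Int × Int)) (r : List Int) (x : Int) (h : PatInv acc r) :
    bestOf acc x = (r.countP (fun y => decide (y < x)) : Int) := by
  set k := r.countP (fun y => decide (y < x)) with hk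
  have hkle : k ≤ r.length := List.countP_le_length
  obtain ⟨hb1, hb2, hb3⟩ := bestOf_bounds x acc 0
  have hle : bestOf acc x ≤ (k : Int) := by
    rcases hb2 with h0 | ⟨p, hp, hpx, hpe⟩
    · unfold bestOf; omega
    · obtain ⟨j, hj1, hj2, hj3⟩ := h.tail p hp
      have hjx : r[j] < x := lt_of_le_of_lt hj3 hpx
      have := (sorted_lt_iff x r h.sorted j hj2).mp hjx
      unfold bestOf; omega
  have hge : (k : Int) ≤ bestOf acc x := by
    rcases Nat.eq_zero_or_pos k with h0 | hpos
    · unfold bestOf; omega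
    · have hj : k - 1 < r.length := by omega
      have hrj : r[k-1] < x := (sorted_lt_iff x r h.sorted (k-1) hj).mpr (by omega)
      obtain ⟨p, hp, hp2, hp1⟩ := h.wit (k-1) hj
      have := hb3 p hp (hp1 ▸ hrj)
      unfold bestOf
      have : ((k - 1 : Nat) : Int) = (k : Int) - 1 := by omega
      omega
  omega

-- the uniform update lemma
lemma patinv_update (acc : List (Int × Int)) (r : List Int) (x : Int) (h : PatInv acc r)
    (r' : List Int)
    (hlen' : r'.length = max r.length (r.countP (fun y => decide (y < x)) + 1))
    (hget' : ∀ j, (hj : j < r'.length) →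
      r'[j] = if j = r.countP (fun y => decide (y < x)) then x else r.getD j 0) :
    PatInv (dpStep acc x) r' := by
  set k := r.countP (fun y => decide (y < x)) with hkdef
  have hkle : k ≤ r.length := List.countP_le_length
  have hklt : ∀ j, j < r'.length → j ≠ k → j < r.length := by
    intro j hj hne; omega
  have hgetr : ∀ j, (hj : j < r'.length) → (hne : j ≠ k) → r'[j] = r[j]'(hklt j hj hne) := by
    intro j hj hne
    rw [hget' j hj, if_neg hne, List.getD_eq_getElem r 0 (hklt j hj hne)]
  have hrk_ge : ∀ hk : k < r.length, x ≤ r[k] := by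
    intro hk
    by_contra hlt
    have := (sorted_lt_iff x r h.sorted k hk).mp (by omega)
    omega
  have hkcast := bestOf_eq_countP acc r x h
  constructor
  · simp [dpStep]
  · -- sorted
    rw [List.pairwise_iff_getElem]
    intro i j hi hj hij
    have hjk : j ≤ k ∨ (j ≠ k ∧ j < r.length) := by
      by_cases hj' : j = k
      · exact Or.inl (le_of_eq hj')
      · exact Or.inr ⟨hj', hklt j hj hj'⟩
    by_cases hik : i = k
    · -- i = k < j, j ≠ k, so j < r.length and k < j ≤ r.length - 1 so k < r.length
      have hjne : j ≠ k := by omega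
      have hjr : j < r.length := hklt j hj hjne
      have hkr : k < r.length := by omega
      rw [hget' i hi, if_pos hik, hgetr j hj hjne]
      calc x ≤ r[k] := hrk_ge hkr
        _ < r[j] := List.pairwise_iff_getElem.mp h.sorted k j hkr hjr (by omega)
    · have hir : i < r.length := hklt i hi hik
      rw [hgetr i hi hik]
      by_cases hjkk : j = k
      · -- r[i] < x since i < k
        rw [hget' j hj, if_pos hjkk]
        exact (sorted_lt_iff x r h.sorted i hir).mpr (by omega)
      · have hjr : j < r.length := hklt j hj hjkk
        rw [hgetr j hj hjkk]
        exact List.pairwise_iff_getElem.mp h.sorted i j hir hjr hij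
  · -- pos
    intro p hp
    rcases List.mem_append.mp hp with hmem | hmem
    · exact h.pos p hmem
    · simp at hmem
      subst hmem
      simp only []
      omega
  · -- len
    show ((r'.length : Nat) : Int) = maxd (acc ++ [(x, bestOf acc x + 1)])
    rw [hlen', maxd_append, ← h.len, hkcast]
    omega
  · -- wit
    intro j hj
    by_cases hjk : j = k
    · refine ⟨(x, bestOf acc x + 1), by simp [dpStep], ?_, ?_⟩
      · simp only [hkcast, hjk]; ring
      · rw [hget' j hj, if_pos hjk]
    · have hjr : j < r.length := hklt j hj hjk
      obtain ⟨p, hp, hp2, hp1⟩ := h.wit j hjr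
      exact ⟨p, List.mem_append.mpr (Or.inl hp), hp2, by rw [hgetr j hj hjk]; exact hp1⟩
  · -- tail
    intro p hp
    rcases List.mem_append.mp hp with hmem | hmem
    · obtain ⟨j, hj1, hj2, hj3⟩ := h.tail p hmem
      refine ⟨j, hj1, by omega, ?_⟩
      by_cases hjk : j = k
      · rw [hget' j (by omega), if_pos hjk]
        have hj2' : k < r.length := hjk ▸ hj2
        have : r[k]'hj2' ≤ p.1 := by
          have := hj3
          simp only [hjk] at this
          exact this
        exact le_trans (hrk_ge hj2') this
      · rw [hgetr j (by omega) hjk]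
        exact hj3
    · simp at hmem
      subst hmem
      refine ⟨k, by rw [hkcast, ← hkdef]; push_cast; ring, by omega, ?_⟩
      rw [hget' k (by omega), if_pos rfl]

lemma inv_step (acc : List (Int × Int)) (r : List Int) (x : Int) (h : PatInv acc r) :
    PatInv (dpStep acc x) (patStep r x) := by
  have hlenpos := patinv_len_pos acc r h
  have hne : r ≠ [] := List.ne_nil_of_length_pos hlenpos
  set k := r.countP (fun y => decide (y < x)) with hkdef
  have hkle : k ≤ r.length := List.countP_le_length
  unfold patStep
  rw [PySem.List.pyGetD_neg_one r 0 hne]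
  by_cases hlast : r.getLast hne < x
  · rw [if_pos hlast]
    -- all elements < x, k = r.length
    have hall : k = r.length := by
      rw [hkdef]
      apply List.countP_eq_length.mpr
      intro a ha
      simp only [decide_eq_true_eq]
      obtain ⟨j, hj, hja⟩ := List.mem_iff_getElem.mp ha
      rcases Nat.lt_or_ge j (r.length - 1) with hj' | hj'
      · have h1 : r[j] < r[r.length - 1]'(by omega) :=
          List.pairwise_iff_getElem.mp h.sorted j (r.length - 1) hj (by omega) hj'
        rw [List.getLast_eq_getElem hne] at hlast
        omega
      · have hje : j = r.length - 1 := by omega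
        subst hje
        rw [List.getLast_eq_getElem hne] at hlast
        exact hja ▸ hlast
    apply patinv_update acc r x h
    · simp only [List.length_append, List.length_singleton, ← hkdef, hall]
      omega
    · intro j hj
      simp only [List.length_append, List.length_singleton] at hj
      by_cases hjk : j = k
      · rw [if_pos hjk]
        exact List.getElem_concat_length (by omega) _
      · rw [if_neg hjk]
        have hjr : j < r.length := by omega
        rw [List.getElem_append_left hjr, List.getD_eq_getElem r 0 hjr]
  · rw [if_neg hlast]
    have hkr : k < r.length := by
      rcases Nat.lt_or_ge k r.length with h' | h'
      · exact h'
      · have : k = r.length := by omega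
        rw [hkdef] at this
        have := List.countP_eq_length.mp this (r.getLast hne) (List.getLast_mem hne)
        simp at this
        omega
    rw [bsearch_spec r x h.sorted hne hlast, ← hkdef, PySem.List.pySetD_natCast]
    apply patinv_update acc r x h
    · simp only [List.length_set, ← hkdef]
      omega
    · intro j hj
      simp only [List.length_set] at hj
      rw [List.getElem_set]
      by_cases hjk : j = k
      · rw [if_pos hjk.symm, if_pos hjk]
      · rw [if_neg (fun hh => hjk hh.symm), if_neg hjk, List.getD_eq_getElem r 0 hj]

lemma patinv_base (x0 : Int) : PatInv [(x0, 1)] [x0] := by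
  constructor
  · simp
  · simp
  · intro p hp; simp at hp; subst hp; norm_num
  · simp [maxd]
  · intro j hj
    simp at hj
    subst hj
    exact ⟨(x0, 1), by simp, by norm_num, by simp⟩
  · intro p hp
    simp at hp
    subst hp
    exact ⟨0, by norm_num, by norm_num, by simp⟩

lemma patinv_fold : ∀ (l : List Int) (acc : List (Int × Int)) (r : List Int),
    PatInv acc r → PatInv (l.foldl dpStep acc) (l.foldl patStep r) := by
  intro l
  induction l with
  | nil => intro acc r h; exact h
  | cons x t ih => intro acc r h; exact ih _ _ (inv_step acc r x h)

lemma accOf_fold_fst : ∀ (l : List Int) (acc : List (Int × Int)),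
    (l.foldl dpStep acc).map Prod.fst = acc.map Prod.fst ++ l := by
  intro l
  induction l with
  | nil => intro acc; simp
  | cons x t ih =>
    intro acc
    simp only [List.foldl_cons, ih, dpStep]
    simp

lemma portB_inner (data : List (List Int)) (x : Int) (m : Nat)
    (acc : List (Int × Int)) (dp : List Int)
    (hdp : dp = acc.map Prod.snd)
    (hfst : acc.map Prod.fst = (PySem.List.pyRange 0 (m : Int) 1).map (valAt data)) :
    (PySem.List.pyRange 0 (m : Int) 1).foldl (fun best j =>
      if PySem.List.pyGetD (PySem.List.pyGetD data j []) 1 0 < x ∧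
         best < PySem.List.pyGetD dp j 0 then PySem.List.pyGetD dp j 0 else best) 0
      = bestOf acc x := by
  have hlr : (PySem.List.pyRange 0 (m : Int) 1).length = m := by
    rw [PySem.List.length_pyRange_one]; omega
  have hlacc : acc.length = m := by
    have := congrArg List.length hfst
    simpa [hlr] using this
  have hldp : dp.length = m := by simp [hdp, hlacc]
  have hacc : acc = (PySem.List.pyRange 0 (m : Int) 1).map
      (fun j => (valAt data j, PySem.List.pyGetD dp j 0)) := by
    apply List.ext_getElem
    · simp [hlr, hlacc]
    · intro t ht1 ht2
      have htm : t < m := by omega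
      have hrt : (PySem.List.pyRange 0 (m : Int) 1)[t]'(by omega) = (t : Int) := by
        rw [PySem.List.getElem_pyRange_one]; omega
      rw [List.getElem_map]
      rw [hrt]
      have h1 : acc[t].1 = valAt data (t : Int) := by
        have := congrArg (fun l => l[t]?) hfst
        simp only [List.getElem?_map] at this
        have ha : acc[t]? = some acc[t] := List.getElem?_eq_getElem ht1
        have hb : (PySem.List.pyRange 0 (m : Int) 1)[t]? = some ((t : Int)) := by
          rw [List.getElem?_eq_getElem (by omega)]
          rw [hrt]
        rw [ha, hb] at this
        simpa using this
      have h2 : acc[t].2 = PySem.List.pyGetD dp (t : Int) 0 := by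
        rw [PySem.List.pyGetD_natCast, hdp]
        rw [List.getD_eq_getElem _ 0 (by simp [hlacc]; omega)]
        simp
      exact Prod.ext h1.symm h2.symm |>.symm
  conv_rhs => rw [bestOf, hacc]
  rw [List.foldl_map]
  rfl

lemma portB_loop (data : List (List Int)) : ∀ (m : Nat),
    (PySem.List.pyRange 1 ((m + 1 : Nat) : Int) 1).foldl (fun dp i =>
      let x := PySem.List.pyGetD (PySem.List.pyGetD data i []) 1 0
      let best := (PySem.List.pyRange 0 i 1).foldl (fun best j =>
        if PySem.List.pyGetD (PySem.List.pyGetD data j []) 1 0 < x ∧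
           best < PySem.List.pyGetD dp j 0 then PySem.List.pyGetD dp j 0 else best) 0
      dp ++ [best + 1]) [1]
    = (((PySem.List.pyRange 0 ((m + 1 : Nat) : Int) 1).map (valAt data)).foldl dpStep []).map Prod.snd := by
  intro m
  induction m with
  | zero =>
    have h1 : ((0 + 1 : Nat) : Int) = 0 + 1 := by norm_num
    rw [h1, PySem.List.pyRange_one_singleton, PySem.List.pyRange_one_eq_nil (by norm_num)]
    simp [dpStep, bestOf]
  | succ m ih =>
    have hsplit : ∀ a : Int, a ≤ ((m + 1 : Nat) : Int) → PySem.List.pyRange a ((m + 1 + 1 : Nat) : Int) 1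
        = PySem.List.pyRange a ((m + 1 : Nat) : Int) 1 ++ [((m + 1 : Nat) : Int)] := by
      intro a ha
      have h1 : ((m + 1 + 1 : Nat) : Int) = ((m + 1 : Nat) : Int) + 1 := by push_cast; ring
      rw [h1]
      exact PySem.List.pyRange_one_succ_right ha
    rw [hsplit 1 (by omega), hsplit 0 (by omega), List.foldl_append, List.map_append, List.foldl_append, ih]
    set acc := ((PySem.List.pyRange 0 ((m + 1 : Nat) : Int) 1).map (valAt data)).foldl dpStep [] with haccdef
    have hfst : acc.map Prod.fst = (PySem.List.pyRange 0 ((m + 1 : Nat) : Int) 1).map (valAt data) := by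
      rw [haccdef, accOf_fold_fst]
      simp
    have hinner := portB_inner data (valAt data ((m + 1 : Nat) : Int)) (m + 1) acc (acc.map Prod.snd) rfl hfst
    simp only [List.foldl_cons, List.foldl_nil, List.map_cons, List.map_nil]
    show (acc.map Prod.snd) ++ [_ + 1] = (dpStep acc (valAt data ((m + 1 : Nat) : Int))).map Prod.snd
    unfold valAt at hinner
    rw [hinner]
    simp [dpStep, valAt, List.getD]

theorem final_eq (n : Int) (data : List (List Int)) :
    solution n data = solution_alt n data := by
  by_cases hn : 1 ≤ n
  case neg =>
    -- no wire is processed: A keeps the seeded singleton, B keeps dp = [1]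
    have hnil : PySem.List.pyRange 1 n 1 = [] := PySem.List.pyRange_one_eq_nil (by omega)
    simp only [solution, solution_alt, hnil, List.foldl_nil, PySem.List.max?_id_cons,
      Option.getD_some, List.length_singleton, Nat.cast_one]
  case pos =>
  have hsplit : PySem.List.pyRange 0 n 1 = 0 :: PySem.List.pyRange 1 n 1 :=
    PySem.List.pyRange_one_cons (by omega)
  set xs := (PySem.List.pyRange 0 n 1).map (valAt data) with hxs
  set acc := xs.foldl dpStep [] with haccdef
  set r := ((PySem.List.pyRange 1 n 1).map (valAt data)).foldl patStep [valAt data 0] with hrdef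
  have hinv : PatInv acc r := by
    rw [haccdef, hxs, hsplit, List.map_cons, List.foldl_cons]
    have hbase : dpStep [] (valAt data 0) = [(valAt data 0, 1)] := by
      simp [dpStep, bestOf]
    rw [hbase]
    exact patinv_fold _ _ _ (patinv_base (valAt data 0))
  -- A's value
  have hA : solution n data = n - (r.length : Int) := by
    rw [hrdef, List.foldl_map]
    rfl
  -- B's value
  have hm : ((n.toNat - 1 + 1 : Nat) : Int) = n := by omega
  have hB0 := portB_loop data (n.toNat - 1)
  rw [hm] at hB0
  have hB : solution_alt n data
      = n - (PySem.List.max? (acc.map Prod.snd) (fun y => y)).getD 0 := by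
    show n - (PySem.List.max? ((PySem.List.pyRange 1 n 1).foldl _ [1]) (fun y => y)).getD 0 = _
    rw [hB0]
  -- max of dp = maxd acc = r.length
  have hmax : (PySem.List.max? (acc.map Prod.snd) (fun y => y)).getD 0 = maxd acc := by
    cases hdp : acc.map Prod.snd with
    | nil => exact absurd (List.map_eq_nil_iff.mp hdp) hinv.ne
    | cons d0 rest =>
      have hd0 : 1 ≤ d0 := by
        have : d0 ∈ acc.map Prod.snd := by rw [hdp]; simp
        obtain ⟨p, hp, hpe⟩ := List.mem_map.mp this
        exact hpe ▸ hinv.pos p hp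
      rw [PySem.List.max?_id_cons, Option.getD_some]
      have hmaxd : maxd acc = (acc.map Prod.snd).foldl max 0 := by
        rw [List.foldl_map]; rfl
      rw [hmaxd, hdp, List.foldl_cons]
      have : max 0 d0 = d0 := by omega
      rw [this]
  rw [hA, hB, hmax, ← hinv.len]

-- ===== VERDICT (by name: the statement is the Claim_ definition above) =====
theorem solution_spec : Claim_equal_solution := by
  intro n data _hdom _hpre
  unfold Spec_solution
  exact final_eq n data
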